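-- pv_equiv track=rewrite | github.com/joaoemanuelzilli/CodeSprint | Solutions/Lvl_2_AdHoc/PLanguage_2453.py | decodificar_mensagem
-- ===== SOURCE A (Python) =====
-- def decodificar_mensagem(mensagem):
--     decodificada = []
--     i = 0
--     while i < len(mensagem):
--         if mensagem[i] == 'p' and i + 1 < len(mensagem):
--             decodificada.append(mensagem[i + 1])
--             i += 2
--         else:
--             decodificada.append(mensagem[i])
--             i += 1
--     return ''.join(decodificada)
-- ===== SOURCE B (Python) =====
-- import re
--
-- def decodificar_mensagem(mensagem):
--     # Single regex substitution: each 'p' followed by exactly one character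
--     # (DOTALL: the character may be a newline) is replaced by that character;
--     # the scan is left-to-right and non-overlapping, a trailing lone 'p' stays.
--     return re.sub(r'p(.)', r'\1', mensagem, flags=re.DOTALL)
-- ===== Notes on version B (the rewrite author's own statement) =====
-- stated objective: idiomatic
-- what changed: Replaced the index-manipulating while loop with accumulator list by a single non-overlapping regex substitution p(.) -> captured char (DOTALL), which performs the same skip-one-after-p decoding in one library call.
import Mathlib
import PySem

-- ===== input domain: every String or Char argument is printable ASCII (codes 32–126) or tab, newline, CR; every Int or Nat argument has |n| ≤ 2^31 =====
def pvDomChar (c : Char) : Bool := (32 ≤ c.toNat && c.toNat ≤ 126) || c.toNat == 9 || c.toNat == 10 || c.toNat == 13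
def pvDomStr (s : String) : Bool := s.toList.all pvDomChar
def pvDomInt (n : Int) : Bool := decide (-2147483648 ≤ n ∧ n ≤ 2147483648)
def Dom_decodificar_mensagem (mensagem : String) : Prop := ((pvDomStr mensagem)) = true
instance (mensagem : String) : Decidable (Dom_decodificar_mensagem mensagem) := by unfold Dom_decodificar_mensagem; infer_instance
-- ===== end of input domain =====

-- B replaces A's index-manipulating while loop by one regex substitution re.sub(r'p(.)', r'\1', …, DOTALL); idiomatic, same cost.

-- ===== PORT A =====
-- A's while loop: index i, accumulator list 'decodificada'; terminates since len - i decreases.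
def pvLoopA (cs : List Char) (i : Nat) (acc : List Char) : List Char :=
  if h : i < cs.length then
    if hp : cs[i] = 'p' ∧ i + 1 < cs.length then
      pvLoopA cs (i + 2) (acc ++ [cs[i + 1]'hp.2])
    else
      pvLoopA cs (i + 1) (acc ++ [cs[i]])
  else acc
termination_by cs.length - i

def decodificar_mensagem (mensagem : String) : String :=
  String.ofList (pvLoopA mensagem.toList 0 [])

-- ===== PORT B =====
-- The regex engine's left-to-right non-overlapping scan for p(.) with DOTALL:
-- at each position, if 'p' followed by any one character, emit that character and resume
-- after the match; otherwise emit the character unchanged. Exact for this pattern.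
def pvRegexSub : List Char → List Char
  | [] => []
  | [c] => [c]
  | c :: c2 :: rest => if c = 'p' then c2 :: pvRegexSub rest else c :: pvRegexSub (c2 :: rest)

def decodificar_mensagem_alt (mensagem : String) : String :=
  String.ofList (pvRegexSub mensagem.toList)

-- ===== PRECONDITION & SPEC =====
def Spec_decodificar_mensagem (mensagem : String) (out : String) : Prop := out = decodificar_mensagem_alt mensagem
instance (mensagem : String) (out : String) : Decidable (Spec_decodificar_mensagem mensagem out) := by unfold Spec_decodificar_mensagem; infer_instance

-- ===== CLAIM (what is proved, stated in full; the proofs are below) =====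
def Claim_equal_decodificar_mensagem : Prop := ∀ (mensagem : String), Dom_decodificar_mensagem mensagem → Spec_decodificar_mensagem mensagem (decodificar_mensagem mensagem)

-- ===== LEMMAS AND PROOFS =====
lemma pvLoopA_eq (cs : List Char) (i : Nat) (acc : List Char) :
    pvLoopA cs i acc = acc ++ pvRegexSub (cs.drop i) := by
  induction i, acc using pvLoopA.induct (cs := cs) with
  | case1 i acc h hp ih =>
    rw [pvLoopA, dif_pos h, dif_pos hp, ih]
    have hdrop : cs.drop i = cs[i] :: cs.drop (i + 1) := (List.getElem_cons_drop h).symm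
    have hdrop2 : cs.drop (i + 1) = cs[i + 1]'hp.2 :: cs.drop (i + 2) :=
      (List.getElem_cons_drop hp.2).symm
    rw [hdrop, hdrop2, pvRegexSub, if_pos hp.1]
    simp
  | case2 i acc h hp ih =>
    rw [pvLoopA, dif_pos h, dif_neg hp, ih]
    have hdrop : cs.drop i = cs[i] :: cs.drop (i + 1) := (List.getElem_cons_drop h).symm
    rw [hdrop]
    rcases Decidable.em (cs[i] = 'p') with hc | hc
    · have hnil : cs.drop (i + 1) = [] :=
        List.drop_eq_nil_of_le (Nat.le_of_not_lt fun hlt => hp ⟨hc, hlt⟩)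
      rw [hnil]
      simp [pvRegexSub]
    · rcases hd : cs.drop (i + 1) with _ | ⟨c, rest⟩
      · simp [pvRegexSub]
      · rw [pvRegexSub, if_neg hc]
        simp
  | case3 i acc h =>
    rw [pvLoopA, dif_neg h, List.drop_eq_nil_of_le (Nat.le_of_not_lt h)]
    simp [pvRegexSub]

-- ===== VERDICT (by name: the statement is the Claim_ definition above) =====
theorem decodificar_mensagem_spec : Claim_equal_decodificar_mensagem := by
  intro m _
  unfold Spec_decodificar_mensagem decodificar_mensagem decodificar_mensagem_alt
  rw [pvLoopA_eq]
  simp
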